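-- pv_equiv track=rewrite | github.com/reyley/advent_of_code | src/2023/day_12/part_1.py | get_all_options
-- ===== SOURCE A (Python) =====
-- def get_all_options(num):
--     if num == 0:
--         return []
--     options = [["#"], ["."]]
--     for i in range(num - 1):
--         new_options = []
--         for o in options:
--             new_options.append(["#"] + o)
--             new_options.append(["."] + o)
--         options = new_options
--     return options
-- ===== SOURCE B (Python) =====
-- def get_all_options(num):
--     if num == 0:
--         return []
--     if num <= 1:
--         return [["#"], ["."]]
--     return [[c] + o for o in get_all_options(num - 1) for c in ("#", ".")]
-- ===== Notes on version B (the rewrite author's own statement) =====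
-- stated objective: alternative
-- what changed: B replaces A's iterative rebuild of the whole option list (num-1 generations, each an explicit inner loop appending '#'- and '.'-prefixed copies into a fresh accumulator) with a direct structural recursion: the options for num are a single comprehension prefixing each character onto the options for num-1, with the recursion base at num <= 1.
import Mathlib
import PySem

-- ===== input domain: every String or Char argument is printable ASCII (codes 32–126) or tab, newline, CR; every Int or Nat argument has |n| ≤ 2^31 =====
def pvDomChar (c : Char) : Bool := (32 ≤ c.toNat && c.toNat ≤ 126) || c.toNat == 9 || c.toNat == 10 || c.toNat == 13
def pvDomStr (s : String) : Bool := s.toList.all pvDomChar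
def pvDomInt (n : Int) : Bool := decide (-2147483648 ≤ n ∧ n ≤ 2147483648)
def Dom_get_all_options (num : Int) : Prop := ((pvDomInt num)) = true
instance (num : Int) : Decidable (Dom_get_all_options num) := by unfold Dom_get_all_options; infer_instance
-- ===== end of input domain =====

-- B replaces A's iterative doubling loop with a structural recursion on num
-- (alternative decomposition, same output including order).


-- ===== PORT A =====
def get_all_options (num : Int) : List (List String) :=
  if num == 0 then []
  else
    (PySem.List.pyRange 0 (num - 1) 1).foldl
      (fun options _ =>
        options.foldl (fun new_options o =>
          (new_options ++ [["#"] ++ o]) ++ [["."] ++ o]) [])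
      [["#"], ["."]]

-- ===== PORT B =====
def get_all_options_alt (num : Int) : List (List String) :=
  if num == 0 then []
  else if num ≤ 1 then [["#"], ["."]]
  else (get_all_options_alt (num - 1)).flatMap (fun o =>
    (["#", "."]).map (fun c => [c] ++ o))
termination_by num.toNat
decreasing_by omega

-- ===== PRECONDITION & SPEC =====
def Spec_get_all_options (num : Int) (out : List (List String)) : Prop := out = get_all_options_alt num
instance (num : Int) (out : List (List String)) : Decidable (Spec_get_all_options num out) := by unfold Spec_get_all_options; infer_instance

-- ===== CLAIM (what is proved, stated in full; the proofs are below) =====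
def Claim_equal_get_all_options : Prop := ∀ (num : Int), Dom_get_all_options num → Spec_get_all_options num (get_all_options num)

-- ===== LEMMAS AND PROOFS =====

-- A's one generation: prepend "#" and "." to every option (the inner loop of A).
def pvStep (L : List (List String)) : List (List String) :=
  L.foldl (fun acc o => (acc ++ [["#"] ++ o]) ++ [["."] ++ o]) []

theorem pv_foldl_const {α β : Type} (g : α → α) :
    ∀ (l : List β) (init : α), l.foldl (fun s _ => g s) init = g^[l.length] init := by
  intro l
  induction l with
  | nil => intro init; simp
  | cons x t ih => intro init; simp [List.foldl, ih, Function.iterate_succ_apply]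

theorem pvStep_eq_flatMap (L : List (List String)) :
    pvStep L = L.flatMap (fun o => [["#"] ++ o, ["."] ++ o]) := by
  have gen : ∀ (M : List (List String)) (acc : List (List String)),
      M.foldl (fun acc o => (acc ++ [["#"] ++ o]) ++ [["."] ++ o]) acc
        = acc ++ M.flatMap (fun o => [["#"] ++ o, ["."] ++ o]) := by
    intro M
    induction M with
    | nil => intro acc; simp
    | cons x t ih => intro acc; simp [List.foldl, List.flatMap]
  simpa [pvStep] using gen L []

theorem pv_alt_iterate : ∀ k : Nat,
    get_all_options_alt ((k : Int) + 1) = pvStep^[k] [["#"], ["."]] := by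
  intro k
  induction k with
  | zero =>
    rw [get_all_options_alt]
    norm_num
  | succ m ih =>
    rw [get_all_options_alt]
    push_cast
    have h0 : ¬ ((m : Int) + 1 + 1 == 0) = true := by simp; omega
    have h1 : ¬ ((m : Int) + 1 + 1 ≤ 1) := by omega
    rw [if_neg h0, if_neg h1,
      show (m : Int) + 1 + 1 - 1 = (m : Int) + 1 by ring, ih,
      Function.iterate_succ_apply', pvStep_eq_flatMap]
    rfl

-- ===== VERDICT (by name: the statement is the Claim_ definition above) =====
theorem get_all_options_spec : Claim_equal_get_all_options := by
  intro num _
  unfold Spec_get_all_options get_all_options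
  by_cases h0 : num = 0
  · rw [get_all_options_alt]; simp [h0]
  · by_cases hneg : num ≤ 1
    · -- num < 0 or num = 1: A's loop runs zero times, B is at its base case
      have hr : PySem.List.pyRange 0 (num - 1) 1 = [] :=
        PySem.List.pyRange_one_eq_nil (by omega)
      rw [get_all_options_alt]
      simp only [beq_iff_eq, h0, if_false, if_pos hneg, hr, List.foldl_nil]
    · -- num ≥ 2: A iterates (num-1).toNat times
      have hk : num = ((num - 1).toNat : Int) + 1 := by omega
      rw [show (fun (options : List (List String)) (_ : Int) =>
            options.foldl (fun new_options o =>
              (new_options ++ [["#"] ++ o]) ++ [["."] ++ o]) [])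
          = (fun s _ => pvStep s) from rfl]
      rw [if_neg (by simpa using h0), pv_foldl_const, PySem.List.length_pyRange_one]
      rw [hk, pv_alt_iterate]
      norm_num
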